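-- pv_equiv track=rewrite | github.com/faramat/-test_task-Performance-Lab | task1/task1.py | circ_foo
-- ===== SOURCE A (Python) =====
-- def circ_foo(n,m):
--     circ_array = list(range(1,n+1))
--     path = []
--     index = 0
--     while circ_array[index] not in path:
--         path.append(circ_array[index])
--         index = (index + m - 1) % n
--     return path
-- ===== SOURCE B (Python) =====
-- import math
--
-- def circ_foo(n, m):
--     d = (m - 1) % n
--     length = n // math.gcd(n, d)
--     return [1 + (k * d) % n for k in range(length)]
-- ===== Notes on version B (the rewrite author's own statement) =====
-- stated objective: faster
-- what changed: Replaces the walk-until-repeat loop with its linear 'not in path' scan by the closed form: step d=(m-1)%n, cycle length L=n//gcd(n,d), result [1+(k*d)%n for k in range(L)].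
import Mathlib
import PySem

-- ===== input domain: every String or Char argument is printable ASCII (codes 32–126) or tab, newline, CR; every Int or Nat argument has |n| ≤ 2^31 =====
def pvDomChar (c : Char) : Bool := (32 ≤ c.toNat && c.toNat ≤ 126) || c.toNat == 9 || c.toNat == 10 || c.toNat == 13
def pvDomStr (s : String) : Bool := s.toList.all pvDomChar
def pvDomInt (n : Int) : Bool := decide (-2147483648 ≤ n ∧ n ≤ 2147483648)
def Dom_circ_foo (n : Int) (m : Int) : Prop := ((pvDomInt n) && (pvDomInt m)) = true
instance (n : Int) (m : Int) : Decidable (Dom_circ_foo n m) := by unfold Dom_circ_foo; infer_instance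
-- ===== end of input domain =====

-- B replaces A's walk-until-repeat loop (with its linear membership scan) by the closed-form
-- cycle [1 + (k*d) % n for k < n/gcd(n,d)], d = (m-1) % n — asymptotically faster.


-- ===== PORT A =====
-- the while loop: fuel only guards termination (n.toNat + 1 steps always suffice: path holds
-- distinct elements of a set of size n); none from pyGet? = IndexError (excluded by Pre_)
def circFooLoop (n m : Int) (circ : List Int) : Nat → Int → List Int → List Int
  | 0, _, path => path
  | fuel+1, index, path =>
    match PySem.List.pyGet? circ index with
    | none => path
    | some v =>
      if v ∈ path then path
      else circFooLoop n m circ fuel (PySem.Int.mod (index + m - 1) n) (path ++ [v])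

def circ_foo (n : Int) (m : Int) : List Int :=
  let circ_array := PySem.List.pyRange 1 (n + 1) 1
  circFooLoop n m circ_array (n.toNat + 1) 0 []

-- ===== PORT B =====
def circ_foo_alt (n : Int) (m : Int) : List Int :=
  let d := PySem.Int.mod (m - 1) n
  let length := PySem.Int.floordiv n (Int.gcd n d)
  (PySem.List.pyRange 0 length 1).map (fun k => 1 + PySem.Int.mod (k * d) n)

-- ===== PRECONDITION & SPEC =====
-- A raises for n ≤ 0 (IndexError on the empty circle); those inputs are excluded.
def Pre_circ_foo (n : Int) (m : Int) : Prop := 1 ≤ n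
instance (n : Int) (m : Int) : Decidable (Pre_circ_foo n m) := by unfold Pre_circ_foo; infer_instance
def pvWitness_circ_foo : Int × Int := (5, 3)

def Spec_circ_foo (n : Int) (m : Int) (out : List Int) : Prop := out = circ_foo_alt n m
instance (n : Int) (m : Int) (out : List Int) : Decidable (Spec_circ_foo n m out) := by unfold Spec_circ_foo; infer_instance

-- ===== CLAIM (what is proved, stated in full; the proofs are below) =====
def Claim_equal_circ_foo : Prop := ∀ (n : Int) (m : Int), Dom_circ_foo n m → Pre_circ_foo n m → Spec_circ_foo n m (circ_foo n m)

-- ===== LEMMAS AND PROOFS =====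

-- the common closed-form value both ports reduce to, in Nat form
def cfF (N D k : Nat) : Int := 1 + ((k * D % N : Nat) : Int)

-- core number theory: walking by step D from 0 mod N, the value at step j re-hits an earlier
-- value exactly when j = N / gcd N D (the orbit length)
lemma cf_mem_iff (N D : Nat) (hN : 0 < N) (j : Nat) (hj : j ≤ N / Nat.gcd N D) :
    (∃ k, k < j ∧ k * D % N = j * D % N) ↔ j = N / Nat.gcd N D := by
  set g := Nat.gcd N D with hg
  have hg0 : 0 < g := Nat.gcd_pos_of_pos_left D hN
  have hgN : g ∣ N := Nat.gcd_dvd_left N D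
  have hgD : g ∣ D := Nat.gcd_dvd_right N D
  have hL0 : 0 < N / g := Nat.div_pos (Nat.le_of_dvd hN hgN) hg0
  constructor
  · rintro ⟨k, hk, he⟩
    by_contra hne
    have hjL : j < N / g := lt_of_le_of_ne hj hne
    have hmod : Nat.ModEq N (k * D) (j * D) := he
    have hdvd : N ∣ j * D - k * D := (Nat.modEq_iff_dvd' (Nat.mul_le_mul_right D (le_of_lt hk))).mp hmod
    have hsub : j * D - k * D = (j - k) * D := (Nat.sub_mul j k D).symm
    rw [hsub] at hdvd
    set t := j - k with ht
    have ht0 : 0 < t := by omega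
    have htL : t < N / g := by omega
    obtain ⟨c, hc⟩ := hdvd
    have h2 : t * (D / g) = (N / g) * c := by
      have := congrArg (· / g) hc
      simp only at this
      rw [Nat.mul_div_assoc t hgD] at this
      rw [Nat.mul_comm N c, Nat.mul_div_assoc c hgN, Nat.mul_comm c (N/g)] at this
      exact this
    have hcop : Nat.Coprime (N / g) (D / g) := Nat.coprime_div_gcd_div_gcd hg0
    have hdvd2 : (N / g) ∣ t * (D / g) := ⟨c, h2⟩
    have : (N / g) ∣ t := hcop.dvd_of_dvd_mul_right hdvd2
    have := Nat.le_of_dvd ht0 this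
    omega
  · rintro rfl
    refine ⟨0, hL0, ?_⟩
    have : N ∣ (N / g) * D := by
      refine ⟨D / g, ?_⟩
      rw [Nat.mul_comm (N / g) D, ← Nat.mul_div_assoc D hgN, ← Nat.mul_div_assoc N hgD, Nat.mul_comm D N]
    simp [Nat.mod_eq_zero_of_dvd this]

lemma cf_loop_inv (N D : Nat) (hN : 0 < N) (m : Int)
    (hm : PySem.Int.mod (m - 1) (N : Int) = (D : Int)) (fuel j : Nat)
    (hj : j ≤ N / Nat.gcd N D) (hf : N / Nat.gcd N D - j ≤ fuel) :
    circFooLoop (N : Int) m (PySem.List.pyRange 1 ((N : Int) + 1) 1) fuel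
        ((j * D % N : Nat) : Int) ((List.range j).map (cfF N D))
      = (List.range (N / Nat.gcd N D)).map (cfF N D) := by
  have hNpos : (0 : Int) < (N : Int) := by exact_mod_cast hN
  have hcirc : PySem.List.pyRange 1 ((N : Int) + 1) 1
      = (List.range N).map (fun k : Nat => 1 + (k : Int)) := by
    rw [PySem.List.pyRange_one]
    norm_num [← List.map_eq_flatMap, List.map_map, Function.comp]
  induction fuel generalizing j with
  | zero =>
    have hjL : j = N / Nat.gcd N D := by omega
    subst hjL
    simp [circFooLoop]
  | succ fuel ih =>
    have hlt : j * D % N < N := Nat.mod_lt _ hN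
    have hget : PySem.List.pyGet? (PySem.List.pyRange 1 ((N : Int) + 1) 1)
        ((j * D % N : Nat) : Int) = some (cfF N D j) := by
      rw [hcirc, PySem.List.pyGet?_natCast, List.getElem?_map, List.getElem?_range hlt]
      rfl
    have hmem : (cfF N D j ∈ (List.range j).map (cfF N D)) ↔ j = N / Nat.gcd N D := by
      rw [← cf_mem_iff N D hN j hj]
      simp only [List.mem_map, List.mem_range, cfF]
      constructor
      · rintro ⟨k, hk, he⟩; exact ⟨k, hk, by exact_mod_cast (by omega : ((k*D%N : Nat):Int) = ((j*D%N:Nat):Int))⟩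
      · rintro ⟨k, hk, he⟩; exact ⟨k, hk, by rw [he]⟩
    simp only [circFooLoop, hget]
    by_cases hjL : j = N / Nat.gcd N D
    · rw [if_pos (hmem.mpr hjL), hjL]
    · rw [if_neg (fun h => hjL (hmem.mp h))]
      have hstep : PySem.Int.mod (((j * D % N : Nat) : Int) + m - 1) (N : Int)
          = (((j+1) * D % N : Nat) : Int) := by
        rw [PySem.Int.mod_eq_emod_of_pos hNpos]
        rw [PySem.Int.mod_eq_emod_of_pos hNpos] at hm
        have h1 : ((j * D % N : Nat) : Int) + m - 1 = ((j * D % N : Nat) : Int) + (m - 1) := by ring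
        rw [h1, Int.add_emod, hm, ← Int.natCast_mod, ← Int.natCast_add, ← Int.natCast_mod]
        congr 1
        rw [Nat.mod_mod_of_dvd]
        · rw [Nat.mod_add_mod, Nat.succ_mul]
        · exact dvd_refl N
      have hpath : (List.range j).map (cfF N D) ++ [cfF N D j]
          = (List.range (j+1)).map (cfF N D) := by
        rw [List.range_succ, List.map_append]; rfl
      rw [hstep, hpath]
      exact ih (j+1) (by omega) (by omega)

lemma cf_alt_eq (N D : Nat) (m : Int)
    (hm : PySem.Int.mod (m - 1) (N : Int) = (D : Int)) :
    circ_foo_alt (N : Int) m = (List.range (N / Nat.gcd N D)).map (cfF N D) := by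
  unfold circ_foo_alt
  simp only [hm]
  have hg : Int.gcd ((N : Int)) ((D : Int)) = Nat.gcd N D := by
    simp [Int.gcd]
  rw [hg]
  have hfd : PySem.Int.floordiv (N : Int) ((Nat.gcd N D : Nat) : Int)
      = ((N / Nat.gcd N D : Nat) : Int) := by
    exact_mod_cast PySem.Int.floordiv_natCast N (Nat.gcd N D)
  rw [hfd]
  rw [PySem.List.pyRange_one]
  norm_num [← List.map_eq_flatMap, List.map_map, Function.comp, cfF]
  apply List.map_congr_left
  intro k _
  simp only [Function.comp_apply]
  rw [show ((k : Int) * (D : Int)) = ((k * D : Nat) : Int) by push_cast; ring,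
    PySem.Int.mod_natCast]
  rfl

-- ===== VERDICT (by name: the statement is the Claim_ definition above) =====
theorem circ_foo_spec : Claim_equal_circ_foo := by
  intro n m _ hpre
  unfold Pre_circ_foo at hpre
  unfold Spec_circ_foo
  obtain ⟨N, rfl⟩ : ∃ N : Nat, n = (N : Int) := ⟨n.toNat, (Int.toNat_of_nonneg (by omega)).symm⟩
  have hN : 0 < N := by exact_mod_cast hpre
  have hNpos : (0 : Int) < (N : Int) := by exact_mod_cast hN
  obtain ⟨D, hm⟩ : ∃ D : Nat, PySem.Int.mod (m - 1) (N : Int) = (D : Int) :=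
    ⟨(PySem.Int.mod (m - 1) (N : Int)).toNat,
      (Int.toNat_of_nonneg (PySem.Int.mod_nonneg _ hNpos)).symm⟩
  have h0 : ((0 : Nat) * D % N : Nat) = 0 := by simp
  have hmain := cf_loop_inv N D hN m hm (N + 1) 0 (Nat.zero_le _)
    (by have := Nat.div_le_self N (Nat.gcd N D); omega)
  rw [h0] at hmain
  simp only [List.range_zero, List.map_nil, Nat.cast_zero] at hmain
  unfold circ_foo
  rw [cf_alt_eq N D m hm]
  simpa [Int.toNat_natCast] using hmain
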